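-- pv_equiv track=rewrite | github.com/Edecker123/FCK | Compilers/arctic_passes/v2p_pass.py | rank_to_layers
-- ===== SOURCE A (Python) =====
-- def rank_to_layers(rank_list):
--     from collections import Counter
--     from math import floor
--
--     # Initialize a dictionary to hold the layers
--     layers = {}
--
--     # Count the occurrences of each rank
--     rank_counts = Counter(rank_list)
--     # Find the most common rank and its frequency
--     most_common_rank, most_common_count = rank_counts.most_common(1)[0]
--     # Calculate the starting position for the first layer based on the most common rank's frequency
--     start_position = floor(most_common_count / 2)
--
--     # To alternate positions around the start position
--     left_offset = -1  # To move left from the start position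
--     right_offset = 0  # To move right from the start position
--
--     # Track whether the next node in the first layer should be placed to the left or right
--     place_left = True
--
--     # Iterate over the rank_list to place each vertex in its corresponding layer
--     for vertex, layer in enumerate(rank_list):
--         # Ensure the layers dictionary has the key for this layer
--         if layer not in layers:
--             layers[layer] = {}
--
--         if layer == most_common_rank:
--             if place_left:
--                 position = start_position + left_offset
--                 left_offset -= 1  # Decrement to move further left next time
--             else:
--                 position = start_position + right_offset
--                 right_offset += 1  # Increment to move further right next time
--             # Alternate placement for the next node
--             place_left = not place_left
--         else:
--             # For layers other than the most common, position nodes sequentially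
--             position = len(layers[layer])
--
--         # Add the vertex to its corresponding layer with its adjusted position
--         layers[layer][vertex] = position
--
--     # Normalize positions in the most common layer to ensure they start from 0 and are consecutive
--     if most_common_rank in layers:
--         positions = list(layers[most_common_rank].values())
--         min_pos = min(positions)
--         # Shift positions to start from 0 and be consecutive
--         layers[most_common_rank] = {vertex: pos - min_pos for vertex, pos in layers[most_common_rank].items()}
--
--     return layers
-- ===== SOURCE B (Python) =====
-- def rank_to_layers(rank_list):
--     # Two-phase: group indices by rank, then emit each layer's positions directly.
--     groups = {}
--     for i, r in enumerate(rank_list):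
--         groups.setdefault(r, []).append(i)
--     most = max(groups, key=lambda r: len(groups[r]))
--     layers = {}
--     for r, idxs in groups.items():
--         if r == most:
--             half = (len(idxs) + 1) // 2
--             layers[r] = {v: (half - 1 - k // 2 if k % 2 == 0 else half + (k - 1) // 2)
--                          for k, v in enumerate(idxs)}
--         else:
--             layers[r] = {v: k for k, v in enumerate(idxs)}
--     return layers
-- ===== Notes on version B (the rewrite author's own statement) =====
-- stated objective: simpler
-- what changed: A's single stateful pass (per-layer dicts grown in lockstep with left/right offset counters, followed by a min-subtracting normalization of the most common layer) is replaced by one grouping pass rank->index-list plus a closed-form position formula per rank, so the offset state and the normalization pass disappear.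
import Mathlib
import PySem

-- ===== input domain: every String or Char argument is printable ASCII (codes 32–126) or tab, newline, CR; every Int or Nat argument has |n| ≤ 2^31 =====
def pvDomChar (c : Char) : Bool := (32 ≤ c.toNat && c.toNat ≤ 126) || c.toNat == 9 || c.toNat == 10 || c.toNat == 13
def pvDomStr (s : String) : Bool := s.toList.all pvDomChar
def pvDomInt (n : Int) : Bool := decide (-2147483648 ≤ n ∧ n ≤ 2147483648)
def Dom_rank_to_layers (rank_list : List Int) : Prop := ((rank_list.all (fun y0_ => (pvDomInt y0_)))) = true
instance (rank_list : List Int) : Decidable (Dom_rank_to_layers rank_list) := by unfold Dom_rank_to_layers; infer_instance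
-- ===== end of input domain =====

-- B replaces A's single stateful pass (per-layer dicts grown in lockstep with left/right
-- offset counters, then a min-subtracting normalization) by a grouping pass plus a
-- closed-form per-rank position formula (objective: simpler).

-- ===== PORT A =====
-- The loop body of A, named so the proofs can speak about it; it is A's body verbatim.
def pvStepA (most_common_rank start_position : Int)
    (s : PySem.Dict Int (PySem.Dict Int Int) × Int × Int × Bool) (vl : Int × Int) :
    PySem.Dict Int (PySem.Dict Int Int) × Int × Int × Bool :=
  let layers := s.1
  let lo := s.2.1
  let ro := s.2.2.1
  let pl := s.2.2.2
  -- if layer not in layers: layers[layer] = {}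
  let layers := layers.setdefault vl.2 PySem.Dict.empty
  if vl.2 == most_common_rank then
    let position := if pl then start_position + lo else start_position + ro
    -- layers[layer][vertex] = position
    (layers.modify vl.2 PySem.Dict.empty (fun m => m.insert vl.1 position),
     (if pl then lo - 1 else lo), (if pl then ro else ro + 1), !pl)
  else
    let position := ((layers.getD vl.2 PySem.Dict.empty).size : Int)
    (layers.modify vl.2 PySem.Dict.empty (fun m => m.insert vl.1 position), lo, ro, pl)

-- Counter(rank_list).most_common(1)[0] = first pair of the stable sort of the counter's
-- items by count, descending (exact: heapq.nlargest decorates to be stable).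
def rank_to_layers (rank_list : List Int) : List (Int × List (Int × Int)) :=
  match PySem.List.sorted (PySem.Dict.counter rank_list).items (fun p => p.2) true with
  | [] => []   -- Python raises IndexError here (empty rank_list); excluded by Pre_
  | (most_common_rank, most_common_count) :: _ =>
    let start_position := PySem.Int.floordiv most_common_count 2
    let final := (PySem.List.enumerate rank_list).foldl
      (pvStepA most_common_rank start_position) (PySem.Dict.empty, -1, 0, true)
    let layers := final.1
    let layers :=
      if layers.contains most_common_rank then
        match PySem.List.min? (layers.getD most_common_rank PySem.Dict.empty).values (fun x => x) with
        | none => layers   -- unreachable (the layer is nonempty); Python's min would raise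
        | some min_pos =>
          layers.insert most_common_rank
            (PySem.Dict.ofList ((layers.getD most_common_rank PySem.Dict.empty).items.map
              (fun q => (q.1, q.2 - min_pos))))
      else layers
    layers.items.map (fun q => (q.1, q.2.items))

-- ===== PORT B =====
-- max(groups, key=lambda r: len(groups[r])) iterates the dict keys in insertion order
-- looking each value up, i.e. it is max over the items keyed by the value's length.
def rank_to_layers_alt (rank_list : List Int) : List (Int × List (Int × Int)) :=
  let groups := (PySem.List.enumerate rank_list).foldl
    (fun (d : PySem.Dict Int (List Int)) p => d.modify p.2 [] (fun xs => xs ++ [p.1]))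
    PySem.Dict.empty
  match PySem.List.max? groups.items (fun q => (q.2.length : Int)) with
  | none => []    -- Python raises ValueError here (empty rank_list); excluded by Pre_
  | some q0 =>
    groups.items.map (fun q =>
      if q.1 == q0.1 then
        let half : Int := ((q.2.length + 1) / 2 : Nat)
        (q.1, (PySem.List.enumerate q.2).map (fun kv =>
          (kv.2, if kv.1 % 2 == 0 then half - 1 - kv.1 / 2 else half + (kv.1 - 1) / 2)))
      else
        (q.1, (PySem.List.enumerate q.2).map (fun kv => (kv.2, kv.1))))

-- ===== PRECONDITION & SPEC =====
-- A raises IndexError on the empty list (Counter([]).most_common(1) is empty); B's max()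
-- raises ValueError there too, so the empty list lies outside Pre_.
def Pre_rank_to_layers (rank_list : List Int) : Prop := rank_list ≠ []
instance (rank_list : List Int) : Decidable (Pre_rank_to_layers rank_list) := by unfold Pre_rank_to_layers; infer_instance
def pvWitness_rank_to_layers : List Int := [1, 2, 1]

def Spec_rank_to_layers (rank_list : List Int) (out : List (Int × List (Int × Int))) : Prop := out = rank_to_layers_alt rank_list
instance (rank_list : List Int) (out : List (Int × List (Int × Int))) : Decidable (Spec_rank_to_layers rank_list out) := by unfold Spec_rank_to_layers; infer_instance

-- ===== CLAIM (what is proved, stated in full; the proofs are below) =====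
def Claim_equal_rank_to_layers : Prop := ∀ (rank_list : List Int), Dom_rank_to_layers rank_list → Pre_rank_to_layers rank_list → Spec_rank_to_layers rank_list (rank_to_layers rank_list)

-- ===== LEMMAS AND PROOFS =====

-- The list of indices (vertices) of the occurrences of rank r, in order.
def pvOcc (l : List Int) (r : Int) : List Int :=
  ((PySem.List.enumerate l).filter (fun p => p.2 == r)).map (fun p => p.1)

-- The raw position A assigns to the k-th occurrence of rank r.
def pvPos (start most r : Int) (k : Int) : Int :=
  if r = most then (if k % 2 == 0 then start - 1 - k / 2 else start + (k - 1) / 2) else k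

-- The per-rank inner dict A's loop has built after the whole pass.
def pvInner (l : List Int) (start most r : Int) : PySem.Dict Int Int :=
  PySem.Dict.mk ((PySem.List.enumerate (pvOcc l r)).map (fun kv => (kv.2, pvPos start most r kv.1)))

def pvLayersA (l : List Int) (start most : Int) : PySem.Dict Int (PySem.Dict Int Int) :=
  PySem.Dict.mk ((PySem.Set.ofList l).map (fun r => (r, pvInner l start most r)))

lemma pvModify_eq {ν : Type} (d : PySem.Dict Int ν) (k : Int) (d0 : ν) (f : ν → ν) :
    d.modify k d0 f = d.insert k (f (d.getD k d0)) := rfl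

lemma pvOcc_append (l : List Int) (x r : Int) :
    pvOcc (l ++ [x]) r = if r = x then pvOcc l r ++ [(l.length : Int)] else pvOcc l r := by
  unfold pvOcc
  rw [PySem.List.enumerate_append, List.filter_append, List.map_append]
  by_cases hrx : r = x
  · subst hrx
    simp [PySem.List.enumerate_cons, PySem.List.enumerate_nil]
  · simp [PySem.List.enumerate_cons, PySem.List.enumerate_nil,
      beq_eq_false_iff_ne.mpr (Ne.symm hrx), hrx]

lemma length_pvOcc (l : List Int) (r : Int) : (pvOcc l r).length = l.count r := by
  induction l using List.reverseRecOn with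
  | nil => simp [pvOcc, PySem.List.enumerate_nil]
  | append_singleton l x ih =>
    rw [pvOcc_append]
    by_cases hrx : r = x
    · subst hrx; simp [List.count_append, ih]
    · simp [List.count_append, ih, hrx, List.count_singleton]
      omega

lemma mem_pvOcc (l : List Int) (r a : Int) (h : a ∈ pvOcc l r) : 0 ≤ a ∧ a < l.length := by
  induction l using List.reverseRecOn with
  | nil => simp [pvOcc, PySem.List.enumerate_nil] at h
  | append_singleton l x ih =>
    rw [pvOcc_append] at h
    by_cases hrx : r = x
    · rw [if_pos hrx] at h
      rcases List.mem_append.1 h with h' | h'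
      · have := ih h'
        simp only [List.length_append, List.length_singleton]; omega
      · simp at h'; subst h'
        simp only [List.length_append, List.length_singleton]; omega
    · rw [if_neg hrx] at h
      have := ih h
      simp only [List.length_append, List.length_singleton]; omega

lemma nodup_pvOcc (l : List Int) (r : Int) : (pvOcc l r).Nodup := by
  induction l using List.reverseRecOn with
  | nil => simp [pvOcc, PySem.List.enumerate_nil]
  | append_singleton l x ih =>
    rw [pvOcc_append]
    by_cases hrx : r = x
    · rw [if_pos hrx]
      refine List.Nodup.append ih (List.nodup_singleton _) ?_
      intro a ha hb
      have := mem_pvOcc l r a ha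
      simp at hb; subst hb; omega
    · rw [if_neg hrx]; exact ih

lemma pvInner_keys (l : List Int) (start most r : Int) :
    (pvInner l start most r).keys = pvOcc l r := by
  show ((PySem.List.enumerate (pvOcc l r)).map
      (fun kv => (kv.2, pvPos start most r kv.1))).map (fun p => p.1) = _
  rw [List.map_map]
  exact PySem.List.map_snd_enumerate (pvOcc l r) 0

lemma pvLayersA_keys (l : List Int) (start most : Int) :
    (pvLayersA l start most).keys = PySem.Set.ofList l := by
  show ((PySem.Set.ofList l).map (fun r => (r, pvInner l start most r))).map (fun p => p.1) = _
  rw [List.map_map]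
  have : ((fun p : Int × PySem.Dict Int Int => p.1) ∘ fun r => (r, pvInner l start most r)) = fun r => r := rfl
  rw [this, List.map_id']

lemma pvOcc_nil_of_not_mem (l : List Int) (x : Int) (h : x ∉ l) : pvOcc l x = [] := by
  have : (pvOcc l x).length = 0 := by
    rw [length_pvOcc]; exact List.count_eq_zero.2 h
  exact List.eq_nil_of_length_eq_zero this

lemma pvInner_append_ne (l : List Int) (start most x r : Int) (h : r ≠ x) :
    pvInner (l ++ [x]) start most r = pvInner l start most r := by
  unfold pvInner; rw [pvOcc_append, if_neg h]

lemma pvInner_of_not_mem (l : List Int) (start most x : Int) (h : x ∉ l) :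
    pvInner l start most x = PySem.Dict.empty := by
  unfold pvInner
  rw [pvOcc_nil_of_not_mem l x h, PySem.List.enumerate_nil, List.map_nil]
  rfl

lemma pvInner_size (l : List Int) (start most r : Int) :
    (pvInner l start most r).size = l.count r := by
  show ((PySem.List.enumerate (pvOcc l r)).map _).length = _
  rw [List.length_map, PySem.List.length_enumerate, length_pvOcc]

lemma pvInner_append_self (l : List Int) (start most x : Int) :
    pvInner (l ++ [x]) start most x =
      (pvInner l start most x).insert (l.length : Int)
        (pvPos start most x ((l.count x : Nat) : Int)) := by
  apply PySem.Dict.ext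
  have hfresh : (pvInner l start most x).contains (l.length : Int) = false := by
    rw [PySem.Dict.contains_eq_decide_mem_keys, pvInner_keys]
    simp only [decide_eq_false_iff_not]
    intro hmem
    have := mem_pvOcc l x _ hmem
    omega
  rw [PySem.Dict.items_insert_of_not_contains _ _ hfresh]
  show ((PySem.List.enumerate (pvOcc (l ++ [x]) x)).map _) = _
  rw [pvOcc_append, if_pos rfl, PySem.List.enumerate_append, List.map_append]
  congr 1
  simp [PySem.List.enumerate_cons, PySem.List.enumerate_nil, length_pvOcc]

lemma pvLayersA_contains (l : List Int) (start most x : Int) :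
    (pvLayersA l start most).contains x = decide (x ∈ l) := by
  rw [PySem.Dict.contains_eq_decide_mem_keys, pvLayersA_keys]
  simp [PySem.Set.mem_ofList]

lemma pvLayersA_getD (l : List Int) (start most x : Int) (h : x ∈ l) :
    (pvLayersA l start most).getD x PySem.Dict.empty = pvInner l start most x := by
  apply PySem.Dict.getD_of_mem_items
  · show (x, pvInner l start most x) ∈ (PySem.Set.ofList l).map _
    exact List.mem_map.2 ⟨x, (PySem.Set.mem_ofList l x).2 h, rfl⟩
  · rw [pvLayersA_keys]; exact PySem.Set.nodup_ofList l

lemma pvLayersA_append (l : List Int) (start most x : Int) :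
    (pvLayersA l start most).insert x (pvInner (l ++ [x]) start most x) =
      pvLayersA (l ++ [x]) start most := by
  apply PySem.Dict.ext
  have hS : PySem.Set.ofList (l ++ [x]) = PySem.Set.add (PySem.Set.ofList l) x := by
    rw [PySem.Set.ofList_append]; rfl
  by_cases hxl : x ∈ l
  · rw [PySem.Dict.items_insert_of_contains _ _ (by simp [pvLayersA_contains, hxl])]
    show ((PySem.Set.ofList l).map _).map _ = (PySem.Set.ofList (l ++ [x])).map _
    have hadd : PySem.Set.ofList (l ++ [x]) = PySem.Set.ofList l := by
      rw [hS]
      unfold PySem.Set.add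
      rw [if_pos (by rw [PySem.Set.contains_eq_decide]; simp [PySem.Set.mem_ofList, hxl])]
    rw [hadd, List.map_map]
    refine List.map_congr_left (fun r _ => ?_)
    by_cases hrx : r = x
    · subst hrx; simp
    · simp only [Function.comp_apply]
      rw [if_neg (by simp [hrx]), pvInner_append_ne l start most x r hrx]
  · rw [PySem.Dict.items_insert_of_not_contains _ _ (by simp [pvLayersA_contains, hxl])]
    show ((PySem.Set.ofList l).map _) ++ _ = (PySem.Set.ofList (l ++ [x])).map _
    have hadd : PySem.Set.ofList (l ++ [x]) = PySem.Set.ofList l ++ [x] := by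
      rw [hS]
      unfold PySem.Set.add
      rw [if_neg (by rw [PySem.Set.contains_eq_decide]; simp [PySem.Set.mem_ofList, hxl])]
    rw [hadd, List.map_append, List.map_singleton]
    congr 1
    refine List.map_congr_left (fun r hr => ?_)
    have hrx : r ≠ x := fun he => hxl (by
      subst he; exact (PySem.Set.mem_ofList l r).1 hr)
    rw [pvInner_append_ne l start most x r hrx]

lemma pvLoStep (j : Nat) :
    (if (j % 2 == 0 : Bool) then (-1 - (((j + 1) / 2 : Nat) : Int)) - 1
     else -1 - (((j + 1) / 2 : Nat) : Int)) = -1 - (((j + 1 + 1) / 2 : Nat) : Int) := by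
  by_cases h : j % 2 = 0
  · simp only [h]; norm_num; omega
  · have hb : (j % 2 == 0) = false := beq_eq_false_iff_ne.mpr h
    simp only [hb, Bool.false_eq_true, if_false]; omega

lemma pvRoStep (j : Nat) :
    (if (j % 2 == 0 : Bool) then ((j / 2 : Nat) : Int) else ((j / 2 : Nat) : Int) + 1) =
      (((j + 1) / 2 : Nat) : Int) := by
  by_cases h : j % 2 = 0
  · have hb : (j % 2 == 0) = true := by simp [h]
    simp only [hb, if_true]; omega
  · have hb : (j % 2 == 0) = false := beq_eq_false_iff_ne.mpr h
    simp only [hb, Bool.false_eq_true, if_false]; omega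

lemma pvPlStep (j : Nat) : (!(j % 2 == 0 : Bool)) = ((j + 1) % 2 == 0) := by
  by_cases h : j % 2 = 0
  · have h1 : (j + 1) % 2 = 1 := by omega
    simp [h, h1]
  · have h0 : j % 2 = 1 := by omega
    have h1 : (j + 1) % 2 = 0 := by omega
    simp [h0, h1]

lemma pvPosStep (start most : Int) (j : Nat) :
    (if (j % 2 == 0 : Bool) then start + (-1 - (((j + 1) / 2 : Nat) : Int))
     else start + ((j / 2 : Nat) : Int)) = pvPos start most most (j : Int) := by
  unfold pvPos
  rw [if_pos rfl]
  by_cases h : j % 2 = 0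
  · have hb : (j % 2 == 0) = true := by simp [h]
    have hbi : ((j : Int) % 2 == 0) = true := by simp; omega
    simp only [hb, hbi, if_true]; omega
  · have hb : (j % 2 == 0) = false := beq_eq_false_iff_ne.mpr h
    have hbi : ((j : Int) % 2 == 0) = false := by simp; omega
    simp only [hb, hbi, Bool.false_eq_true, if_false]; omega

-- A's loop invariant: after the whole pass the state is determined by the grouping.
lemma pvFoldA_inv (most start : Int) (l : List Int) :
    (PySem.List.enumerate l).foldl (pvStepA most start) (PySem.Dict.empty, -1, 0, true) =
      (pvLayersA l start most,
       -1 - (((l.count most + 1) / 2 : Nat) : Int),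
       (((l.count most / 2 : Nat) : Int)),
       (l.count most % 2 == 0)) := by
  induction l using List.reverseRecOn with
  | nil =>
    simp only [PySem.List.enumerate_nil, List.foldl_nil, List.count_nil]
    norm_num
    rfl
  | append_singleton l x ih =>
    rw [PySem.List.enumerate_append, List.foldl_append, ih, PySem.List.enumerate_cons,
      PySem.List.enumerate_nil, List.foldl_cons, List.foldl_nil]
    unfold pvStepA
    simp only [zero_add]
    by_cases hxl : x ∈ l
    · rw [PySem.Dict.setdefault_of_contains _ _ (by simp [pvLayersA_contains, hxl])]
      by_cases hxm : x = most
      · subst hxm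
        rw [if_pos (by simp)]
        simp only [pvModify_eq, pvLayersA_getD l start x x hxl]
        have hc1 : List.count x (l ++ [x]) = List.count x l + 1 := by simp
        rw [hc1]
        simp only [Prod.mk.injEq]
        refine ⟨?_, ?_, ?_, ?_⟩
        · rw [pvPosStep start x (l.count x), ← pvInner_append_self, pvLayersA_append]
        · exact pvLoStep (l.count x)
        · exact pvRoStep (l.count x)
        · exact pvPlStep (l.count x)
      · rw [if_neg (by simp [hxm])]
        simp only [pvModify_eq, pvLayersA_getD l start most x hxl]
        have hcnt : List.count most (l ++ [x]) = List.count most l := by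
          simp [List.count_append, List.count_singleton,
            beq_eq_false_iff_ne.mpr (fun h : x = most => hxm h)]
        rw [hcnt]
        simp only [Prod.mk.injEq, and_true]
        rw [pvInner_size]
        have hpos : ((l.count x : Nat) : Int) = pvPos start most x ((l.count x : Nat) : Int) := by
          unfold pvPos
          rw [if_neg hxm]
        rw [hpos, ← pvInner_append_self, pvLayersA_append]
    · rw [PySem.Dict.setdefault_of_not_contains _ _ (by simp [pvLayersA_contains, hxl])]
      have hcnt0 : l.count x = 0 := List.count_eq_zero.2 hxl
      have hinner0 : pvInner l start most x = PySem.Dict.empty :=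
        pvInner_of_not_mem l start most x hxl
      by_cases hxm : x = most
      · subst hxm
        rw [if_pos (by simp)]
        simp only [pvModify_eq, PySem.Dict.getD_insert_self, PySem.Dict.insert_insert_self]
        have hc1 : List.count x (l ++ [x]) = List.count x l + 1 := by simp
        rw [hc1]
        simp only [Prod.mk.injEq]
        refine ⟨?_, ?_, ?_, ?_⟩
        · rw [pvPosStep start x (l.count x), ← hinner0, ← pvInner_append_self, pvLayersA_append]
        · exact pvLoStep (l.count x)
        · exact pvRoStep (l.count x)
        · exact pvPlStep (l.count x)
      · rw [if_neg (by simp [hxm])]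
        simp only [pvModify_eq, PySem.Dict.getD_insert_self, PySem.Dict.insert_insert_self]
        have hcnt : List.count most (l ++ [x]) = List.count most l := by
          simp [List.count_append, List.count_singleton,
            beq_eq_false_iff_ne.mpr (fun h : x = most => hxm h)]
        rw [hcnt]
        simp only [Prod.mk.injEq, and_true]
        have hsz : ((PySem.Dict.empty : PySem.Dict Int Int).size : Int) =
            pvPos start most x ((l.count x : Nat) : Int) := by
          unfold pvPos
          rw [if_neg hxm, hcnt0]
          rfl
        rw [hsz, ← hinner0, ← pvInner_append_self, pvLayersA_append]

-- head of Python's stable descending sort = max? (first maximal element).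
lemma pvHead_insertBy {α κ : Type} [LinearOrder κ] (key : α → κ) (x : α) (acc : List α) :
    (PySem.List.insertBy (fun a b => decide (key b < key a)) x acc).head? =
      some (match acc.head? with
            | none => x
            | some h => if key h < key x then x else h) := by
  cases acc with
  | nil => rfl
  | cons y ys =>
    show (if decide (key y < key x) = true then x :: y :: ys
          else y :: PySem.List.insertBy _ x ys).head? = _
    by_cases h : key y < key x <;> simp [h]

lemma pvHead_sorted_rev {α κ : Type} [LinearOrder κ] (xs : List α) (key : α → κ) :
    (PySem.List.sorted xs key true).head? = PySem.List.max? xs key := by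
  have H : ∀ (ys : List α) (acc : List α),
      (ys.foldl (fun acc x => PySem.List.insertBy (fun a b => decide (key b < key a)) x acc) acc).head? =
        ys.foldl (fun o x => match o with
          | none => some x
          | some m => if key m < key x then some x else some m) acc.head? := by
    intro ys
    induction ys with
    | nil => intro acc; rfl
    | cons x t ih =>
      intro acc
      rw [List.foldl_cons, List.foldl_cons, ih]
      congr 1
      rw [pvHead_insertBy]
      cases acc with
      | nil => rfl
      | cons y ys =>
        show some (if key y < key x then x else y) = if key y < key x then some x else some y
        by_cases h : key y < key x <;> simp [h]
  rw [PySem.List.sorted_rev_eq_foldl_insertBy, H]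
  rfl

lemma pvMax?_map {α β κ : Type} [LinearOrder κ] (S : List α) (f : α → β) (key : β → κ) :
    PySem.List.max? (S.map f) key = Option.map f (PySem.List.max? S (fun r => key (f r))) := by
  have H : ∀ (S : List α) (a : Option α),
      S.foldl (fun o r => match o with
        | none => some (f r)
        | some m => if key m < key (f r) then some (f r) else some m) (Option.map f a) =
      Option.map f (S.foldl (fun o r => match o with
        | none => some r
        | some m => if key (f m) < key (f r) then some r else some m) a) := by
    intro S
    induction S with
    | nil => intro a; rfl
    | cons x t ih =>
      intro a
      rw [List.foldl_cons, List.foldl_cons]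
      have hstep : (match Option.map f a with
          | none => some (f x)
          | some m => if key m < key (f x) then some (f x) else some m) =
          Option.map f (match a with
          | none => some x
          | some m => if key (f m) < key (f x) then some x else some m) := by
        cases a with
        | none => rfl
        | some m => simp [apply_ite (Option.map f)]
      rw [hstep, ih]
  unfold PySem.List.max?
  rw [List.foldl_map]
  exact H S none

lemma pvMin?_append_singleton {α κ : Type} [LinearOrder κ] (xs : List α) (key : α → κ)
    (a m : α) (h : PySem.List.min? xs key = some m) :
    PySem.List.min? (xs ++ [a]) key = some (if key a < key m then a else m) := by
  unfold PySem.List.min? at h ⊢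
  rw [List.foldl_append, h]
  show (if key a < key m then some a else some m) = _
  by_cases hc : key a < key m <;> simp [hc]

-- the minimum of the raw positions of the most common rank
lemma pvMin_vals (start : Int) (n : Nat) (hn : 1 ≤ n) :
    PySem.List.min? ((List.range n).map (fun k : Nat =>
        pvPos start 0 0 (k : Int))) (fun y => y) =
      some (start - (((n + 1) / 2 : Nat) : Int)) := by
  induction n, hn using Nat.le_induction with
  | base => simp [pvPos, PySem.List.min?]
  | succ n hn ih =>
    rw [List.range_succ, List.map_append, List.map_singleton,
      pvMin?_append_singleton _ _ _ _ ih]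
    simp only [pvPos, Option.some.injEq]
    split_ifs <;> simp_all <;> omega

-- B's grouping dict, characterised.
lemma pvGroups_items (l : List Int) :
    ((PySem.List.enumerate l).foldl
      (fun (d : PySem.Dict Int (List Int)) p => d.modify p.2 [] (fun xs => xs ++ [p.1]))
      PySem.Dict.empty).items = (PySem.Set.ofList l).map (fun r => (r, pvOcc l r)) := by
  have hgetD : ∀ c : Int,
      ((PySem.List.enumerate l).foldl
        (fun (d : PySem.Dict Int (List Int)) p => d.modify p.2 [] (fun xs => xs ++ [p.1]))
        PySem.Dict.empty).getD c [] = pvOcc l c := by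
    intro c
    have hfm :
        ((PySem.List.enumerate l).map (fun p => (p.2, p.1))).foldl
          (fun (d : PySem.Dict Int (List Int)) p => d.modify p.1 [] (fun xs => xs ++ [p.2]))
          PySem.Dict.empty =
        (PySem.List.enumerate l).foldl
          (fun (d : PySem.Dict Int (List Int)) p => d.modify p.2 [] (fun xs => xs ++ [p.1]))
          PySem.Dict.empty := by
      rw [List.foldl_map]
    rw [← hfm, PySem.Dict.getD_foldl_modify_append]
    simp only [PySem.Dict.getD_empty, List.nil_append, List.filter_map, List.map_map, pvOcc]
    rfl
  have hkeys :
      ((PySem.List.enumerate l).foldl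
        (fun (d : PySem.Dict Int (List Int)) p => d.modify p.2 [] (fun xs => xs ++ [p.1]))
        PySem.Dict.empty).keys = PySem.Set.ofList l := by
    rw [PySem.Dict.keys_foldl_modify_key (PySem.List.enumerate l) (fun p => p.2) []
      (fun _ p => (fun xs => xs ++ [p.1])) PySem.Dict.empty]
    rw [PySem.List.map_snd_enumerate]
    rfl
  have hnd : ((PySem.List.enumerate l).foldl
        (fun (d : PySem.Dict Int (List Int)) p => d.modify p.2 [] (fun xs => xs ++ [p.1]))
        PySem.Dict.empty).keys.Nodup := by
    rw [hkeys]; exact PySem.Set.nodup_ofList l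
  rw [PySem.Dict.items_eq_map_keys _ hnd [], hkeys]
  exact List.map_congr_left (fun r _ => by rw [hgetD r])

-- ===== VERDICT (by name: the statement is the Claim_ definition above) =====
theorem rank_to_layers_spec : Claim_equal_rank_to_layers := by
  intro l _ hpre
  unfold Spec_rank_to_layers
  -- the common data
  obtain ⟨y, hy⟩ : ∃ y, y ∈ l := List.exists_mem_of_ne_nil l hpre
  have hSne : PySem.Set.ofList l ≠ [] :=
    List.ne_nil_of_mem ((PySem.Set.mem_ofList l y).2 hy)
  obtain ⟨m, hm⟩ : ∃ m, PySem.List.max? (PySem.Set.ofList l)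
      (fun r => (List.count r l : Int)) = some m := by
    cases h : PySem.List.max? (PySem.Set.ofList l) (fun r => (List.count r l : Int)) with
    | none => exact absurd ((PySem.List.max?_eq_none_iff _ _).1 h) hSne
    | some m => exact ⟨m, rfl⟩
  have hml : m ∈ l := (PySem.Set.mem_ofList l m).1 (PySem.List.max?_mem hm)
  have hcpos : 1 ≤ List.count m l := List.count_pos_iff.2 hml
  set start := PySem.Int.floordiv (List.count m l : Int) 2 with hstart
  set minv : Int := start - (((List.count m l + 1) / 2 : Nat) : Int) with hminv
  set normItems : List (Int × Int) :=
    (PySem.List.enumerate (pvOcc l m)).map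
      (fun kv => (kv.2, pvPos start m m kv.1 - minv)) with hnormItems
  set Final : List (Int × List (Int × Int)) :=
    (PySem.Set.ofList l).map (fun r =>
      if r = m then (r, normItems)
      else (r, (PySem.List.enumerate (pvOcc l r)).map (fun kv => (kv.2, kv.1)))) with hFinal
  -- ===== A side =====
  have hhead : (PySem.List.sorted (PySem.Dict.counter l).items (fun p => p.2) true).head? =
      some (m, (List.count m l : Int)) := by
    rw [pvHead_sorted_rev, PySem.Dict.items_counter, pvMax?_map, hm]
    rfl
  obtain ⟨t, hs⟩ : ∃ t, PySem.List.sorted (PySem.Dict.counter l).items (fun p => p.2) true =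
      (m, (List.count m l : Int)) :: t := by
    cases h : PySem.List.sorted (PySem.Dict.counter l).items (fun p => p.2) true with
    | nil => rw [h] at hhead; exact absurd hhead (by simp)
    | cons p t =>
      rw [h] at hhead
      simp only [List.head?_cons, Option.some.injEq] at hhead
      exact ⟨t, by rw [hhead]⟩
  have hA : rank_to_layers l = Final := by
    unfold rank_to_layers
    rw [hs]
    dsimp only
    rw [pvFoldA_inv m start l]
    dsimp only
    rw [pvLayersA_contains, if_pos (by simp [hml]), pvLayersA_getD l start m m hml]
    -- the values of the most common layer and their minimum
    have hvals : (pvInner l start m m).values =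
        (List.range (List.count m l)).map (fun k : Nat => pvPos start 0 0 (k : Int)) := by
      show ((PySem.List.enumerate (pvOcc l m)).map
          (fun kv => (kv.2, pvPos start m m kv.1))).map (fun p => p.2) = _
      rw [List.map_map]
      have h1 : ((fun p : Int × Int => p.2) ∘
          (fun kv : Int × Int => (kv.2, pvPos start m m kv.1))) =
          ((fun k : Int => pvPos start m m k) ∘ (fun p : Int × Int => p.1)) := rfl
      rw [h1, ← List.map_map, PySem.List.map_fst_enumerate, zero_add, length_pvOcc,
        PySem.List.pyRange_zero_natCast, List.map_map]
      refine List.map_congr_left (fun k _ => ?_)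
      show pvPos start m m (k : Int) = pvPos start 0 0 (k : Int)
      unfold pvPos
      rw [if_pos rfl, if_pos rfl]
    rw [hvals, pvMin_vals start (List.count m l) hcpos]
    dsimp only
    rw [← hminv]
    -- the normalized dict
    have hofl : ∀ (ps : List (Int × Int)), (ps.map (fun p => p.1)).Nodup →
        (PySem.Dict.ofList ps).items = ps := by
      intro ps hnd
      show (ps.foldl (fun d p => d.insert p.1 p.2) PySem.Dict.empty).items = ps
      rw [PySem.Dict.items_foldl_insert_fresh ps (fun p => p.1) (fun p => p.2) _
        (fun a _ => PySem.Dict.contains_empty _) hnd]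
      have he : (PySem.Dict.empty : PySem.Dict Int Int).items = [] := rfl
      rw [he]
      simp
    have hnormNd : (((pvInner l start m m).items.map
        (fun q => (q.1, q.2 - minv))).map (fun p => p.1)).Nodup := by
      rw [List.map_map]
      have : ((fun p : Int × Int => p.1) ∘ (fun q : Int × Int => (q.1, q.2 - minv))) =
          (fun p : Int × Int => p.1) := rfl
      rw [this]
      have hk := pvInner_keys l start m m
      show (pvInner l start m m).keys.Nodup
      rw [hk]; exact nodup_pvOcc l m
    rw [PySem.Dict.items_insert_of_contains _ _ (by simp [pvLayersA_contains, hml])]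
    show (((PySem.Set.ofList l).map (fun r => (r, pvInner l start m r))).map _).map _ = _
    rw [List.map_map, List.map_map, hFinal]
    refine List.map_congr_left (fun r hr => ?_)
    by_cases hrm : r = m
    · rw [hrm]
      simp only [Function.comp_apply, BEq.rfl, if_true]
      rw [hofl _ hnormNd]
      show (m, ((pvInner l start m m).items.map (fun q => (q.1, q.2 - minv))))
          = (m, normItems)
      rw [hnormItems]
      show (m, ((PySem.List.enumerate (pvOcc l m)).map
          (fun kv => (kv.2, pvPos start m m kv.1))).map (fun q => (q.1, q.2 - minv))) = _
      rw [List.map_map]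
      rfl
    · simp only [Function.comp_apply, beq_eq_false_iff_ne.mpr hrm, Bool.false_eq_true,
        if_false, if_neg hrm]
      show (r, (PySem.List.enumerate (pvOcc l r)).map
          (fun kv => (kv.2, pvPos start m r kv.1))) = _
      refine congrArg _ (List.map_congr_left (fun kv _ => ?_))
      unfold pvPos
      rw [if_neg hrm]
  -- ===== B side =====
  have hB : rank_to_layers_alt l = Final := by
    unfold rank_to_layers_alt
    have hgi := pvGroups_items l
    simp only [hgi]
    rw [pvMax?_map]
    have hkey : (fun r => (((fun r => (r, pvOcc l r)) r).2.length : Int)) =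
        (fun r => (List.count r l : Int)) := by
      funext r; rw [length_pvOcc]
    rw [hkey, hm]
    simp only [Option.map_some]
    rw [hFinal, List.map_map]
    refine List.map_congr_left (fun r hr => ?_)
    by_cases hrm : r = m
    · rw [hrm]
      simp only [Function.comp_apply, BEq.rfl, if_true]
      refine congrArg _ ?_
      rw [hnormItems]
      refine List.map_congr_left (fun kv _ => ?_)
      refine congrArg _ ?_
      rw [length_pvOcc]
      unfold pvPos
      rw [if_pos rfl, hminv]
      by_cases hpar : (kv.1 % 2 == 0 : Bool)
      · rw [if_pos hpar, if_pos hpar]; omega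
      · rw [if_neg hpar, if_neg hpar]; omega
    · simp only [Function.comp_apply, beq_eq_false_iff_ne.mpr hrm, Bool.false_eq_true,
        if_false, if_neg hrm]
  rw [hA, hB]
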